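-- pv_equiv track=rewrite | github.com/milanreykjavik/nanair40 | logic/validator.py | validateOpeningHours
-- ===== SOURCE A (Python) =====
-- def validateOpeningHours(openingHours) -> bool:
--     if not openingHours:
--         return False
--     if type(openingHours) != str:
--         return False
--     charWhitelist = ["0", "1", "2", "3", "4", "5", "6", "7", "8", "9", ":"]
--     cnt = 0
--     count = 0
--     after = False
--     if openingHours[0] == ":":
--         return False
--     for i in openingHours:
--         if count > 2:
--             return False
--         if i == "-":
--             after = True
--             cnt+=1
--         if cnt >= 2:
--             return False
--         if i not in charWhitelist:
--             return False
--         if after: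
--             count = 0
--         count+=1
--     op = openingHours.split(":")
--     if int(op[0]) > 24 or int(op[1]) > 24:
--         return False
--
--     return True
-- ===== SOURCE B (Python) =====
-- def validateOpeningHours(openingHours) -> bool:
--     if not isinstance(openingHours, str):
--         return False
--     chars = list(openingHours)
--     if len(chars) != 3:
--         return False
--     return chars[0].isdigit() and chars[1] == ":" and chars[2].isdigit()
-- ===== Notes on version B (the rewrite author's own statement) =====
-- stated objective: simpler
-- what changed: A's interleaved loop with three accumulators (cnt/count/after) plus a split-and-int tail is replaced by a direct shape test: the only strings A accepts are exactly those of the form digit, colon, digit, so B checks length == 3 and the three character classes and has no loop, no split and no int parsing.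
import Mathlib
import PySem

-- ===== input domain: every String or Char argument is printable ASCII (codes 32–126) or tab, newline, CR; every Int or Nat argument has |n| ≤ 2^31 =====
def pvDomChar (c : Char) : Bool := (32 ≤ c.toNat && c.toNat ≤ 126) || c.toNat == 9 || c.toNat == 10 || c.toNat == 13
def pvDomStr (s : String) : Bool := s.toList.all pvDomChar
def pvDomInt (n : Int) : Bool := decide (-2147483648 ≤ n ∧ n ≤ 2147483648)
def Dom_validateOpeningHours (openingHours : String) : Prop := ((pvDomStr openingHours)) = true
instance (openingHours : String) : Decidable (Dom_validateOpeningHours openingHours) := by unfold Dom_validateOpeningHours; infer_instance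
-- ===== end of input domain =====

-- B replaces A's loop+accumulators+split/int tail by a direct length-3 "digit:digit" shape test (simpler;
-- A raises on some short digit/colon strings, excluded by Pre_; B returns False there).

-- ===== PORT A =====
def pvWL : List Char := ['0', '1', '2', '3', '4', '5', '6', '7', '8', '9', ':']

-- the for-loop of A: state (cnt, count, after); some b = early `return b`, none = loop ran through
def pvLoopA : List Char → Int → Int → Bool → Option Bool
  | [], _, _, _ => none
  | i :: rest, cnt, count, after =>
    if count > 2 then some false
    else
      let after' := if i = '-' then true else after
      let cnt' := if i = '-' then cnt + 1 else cnt
      if cnt' ≥ 2 then some false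
      else if i ∈ pvWL then
        pvLoopA rest cnt' ((if after' then 0 else count) + 1) after'
      else some false

-- the tail after the loop: op = openingHours.split(":"); int(op[0]) > 24 or int(op[1]) > 24
-- (ofChars? none = ValueError, getElem? none = IndexError: both outside Pre_, `false` is a placeholder there)
def pvTailA (l : List Char) : Bool :=
  let op := PySem.Chars.splitOn l [':']
  match PySem.Int.ofChars? (op.headD []) with
  | none => false
  | some n0 =>
    if n0 > 24 then false
    else
      match op[1]? with
      | none => false
      | some p1 =>
        match PySem.Int.ofChars? p1 with
        | none => false
        | some n1 => if n1 > 24 then false else true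

def validateOpeningHoursL (l : List Char) : Bool :=
  match l with
  | [] => false                                   -- if not openingHours: return False
  | a :: _ =>
    if a = ':' then false                         -- if openingHours[0] == ":": return False
    else
      match pvLoopA l 0 0 false with
      | some b => b
      | none => pvTailA l

def validateOpeningHours (openingHours : String) : Bool :=
  validateOpeningHoursL openingHours.toList

-- ===== PORT B =====
def validateOpeningHoursAltL (chars : List Char) : Bool :=
  if chars.length ≠ 3 then false
  else
    match chars with                              -- chars[0]/[1]/[2] under the length-3 guard
    | [a, b, c] => PySem.Chars.isdigit a && (b == ':') && PySem.Chars.isdigit c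
    | _ => false

def validateOpeningHours_alt (openingHours : String) : Bool :=
  validateOpeningHoursAltL openingHours.toList

-- ===== PRECONDITION & SPEC =====
-- pvRaisesB: the short (length ≤ 3) digit/colon shapes on which A's split/int tail raises
-- (IndexError: no second split part reached; ValueError: int("")): a Bool predicate on the characters only.
def pvRaisesB (l : List Char) : Bool :=
  match l with
  | [a] => PySem.Chars.isdigit a
  | [a, b] => PySem.Chars.isdigit a &&
      ((PySem.Chars.isdigit b && decide (10 * (a.toNat - 48) + (b.toNat - 48) ≤ 24)) || b == ':')
  | [a, b, c] => PySem.Chars.isdigit a &&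
      ((PySem.Chars.isdigit b && PySem.Chars.isdigit c &&
          decide (100 * (a.toNat - 48) + 10 * (b.toNat - 48) + (c.toNat - 48) ≤ 24)) ||
       (b == ':' && c == ':') ||
       (PySem.Chars.isdigit b && c == ':' && decide (10 * (a.toNat - 48) + (b.toNat - 48) ≤ 24)))
  | _ => false

-- Pre_ excludes exactly the inputs on which A raises: short (length at most 3) digit/colon strings whose
-- split/int tail hits an IndexError (no second split part) or a ValueError (int of an empty part);
-- B returns False on all of them.
def Pre_validateOpeningHours (openingHours : String) : Prop :=
  pvRaisesB openingHours.toList = false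

instance (openingHours : String) : Decidable (Pre_validateOpeningHours openingHours) := by
  unfold Pre_validateOpeningHours; infer_instance

def pvWitness_validateOpeningHours : String := "9:5"

def Spec_validateOpeningHours (openingHours : String) (out : Bool) : Prop :=
  out = validateOpeningHours_alt openingHours
instance (openingHours : String) (out : Bool) : Decidable (Spec_validateOpeningHours openingHours out) := by
  unfold Spec_validateOpeningHours; infer_instance

-- ===== CLAIM (what is proved, stated in full; the proofs are below) =====
def Claim_equal_validateOpeningHours : Prop := ∀ (openingHours : String), Dom_validateOpeningHours openingHours → Pre_validateOpeningHours openingHours → Spec_validateOpeningHours openingHours (validateOpeningHours openingHours)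

-- ===== LEMMAS AND PROOFS =====

-- every ASCII digit is in A's whitelist
lemma pvDigit_mem (c : Char) (h : PySem.Chars.isdigit c = true) : c ∈ pvWL := by
  simp [PySem.Chars.isdigit, Char.le_def, UInt32.le_iff_toNat_le] at h
  obtain ⟨h1, h2⟩ := h
  interval_cases h3 : c.toNat <;> rw [← Char.ofNat_toNat c, h3] <;> decide

-- A's loop never survives a '-' (it fails the whitelist in that same iteration), so cnt/after stay 0/false;
-- from that state it falls through iff every char is whitelisted and the `count > 2` guard is never hit.
lemma pvLoopA_char (l : List Char) (count : Int) (hc : count ≤ 3) :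
    pvLoopA l 0 count false =
      if l.all (· ∈ pvWL) ∧ (count + l.length ≤ 3 ∨ l = []) then none else some false := by
  induction l generalizing count with
  | nil => simp [pvLoopA]
  | cons i rest ih =>
    simp only [pvLoopA]
    by_cases h1 : count > 2
    · rw [if_pos h1, if_neg]
      rintro ⟨-, h2 | h2⟩
      · simp only [List.length_cons] at h2; omega
      · exact List.cons_ne_nil _ _ h2
    · rw [if_neg h1]
      by_cases hi : i = '-'
      · subst hi
        rw [if_pos rfl, if_pos rfl, if_neg (by norm_num), if_neg (by decide), if_neg]
        rintro ⟨hall, -⟩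
        simp only [List.all_cons, Bool.and_eq_true, decide_eq_true_eq] at hall
        exact absurd hall.1 (by decide)
      · rw [if_neg hi, if_neg hi, if_neg (by norm_num)]
        by_cases hw : i ∈ pvWL
        · rw [if_pos hw, if_neg (by exact Bool.false_ne_true), ih (count + 1) (by omega)]
          simp only [List.all_cons, Bool.and_eq_true, decide_eq_true_eq, hw, true_and,
            List.length_cons]
          split_ifs with hA hB hB <;> try rfl
          · exfalso; apply hB
            refine ⟨hA.1, Or.inl ?_⟩
            rcases hA.2 with h | h
            · omega
            · subst h; simp only [List.length_nil]; omega
          · exfalso; apply hA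
            refine ⟨hB.1, Or.inl ?_⟩
            rcases hB.2 with h | h
            · omega
            · exact h.elim
        · rw [if_neg hw, if_neg]
          rintro ⟨hall, -⟩
          simp only [List.all_cons, Bool.and_eq_true, decide_eq_true_eq] at hall
          exact hw hall.1

-- B accepts only length-3 fully-whitelisted strings
lemma pvAlt_true (l : List Char) (h : validateOpeningHoursAltL l = true) :
    l.all (· ∈ pvWL) = true ∧ l.length = 3 := by
  rcases l with _ | ⟨a, _ | ⟨b, _ | ⟨c, _ | ⟨d, rest⟩⟩⟩⟩ <;>
    simp [validateOpeningHoursAltL] at h ⊢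
  obtain ⟨⟨ha, hb⟩, hc⟩ := h
  subst hb
  exact ⟨pvDigit_mem a ha, by decide, pvDigit_mem c hc⟩

lemma pvB_false_of_not_all (l : List Char) (h : l.all (· ∈ pvWL) = false) :
    validateOpeningHoursAltL l = false := by
  cases hB : validateOpeningHoursAltL l
  · rfl
  · exact absurd (pvAlt_true l hB).1 (by simp [h])

lemma pvB_false_of_len (l : List Char) (h : l.length ≠ 3) :
    validateOpeningHoursAltL l = false := by
  unfold validateOpeningHoursAltL
  rw [if_pos h]

lemma pvA_false_of_not_all (l : List Char) (h : l.all (· ∈ pvWL) = false) :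
    validateOpeningHoursL l = false := by
  cases l with
  | nil => rfl
  | cons a t =>
    simp only [validateOpeningHoursL]
    by_cases ha : a = ':'
    · rw [if_pos ha]
    · rw [if_neg ha, pvLoopA_char _ 0 (by norm_num), if_neg (by simp [h])]

lemma pvA_false_of_long (a b c d : Char) (rest : List Char) :
    validateOpeningHoursL (a :: b :: c :: d :: rest) = false := by
  simp only [validateOpeningHoursL]
  by_cases ha : a = ':'
  · rw [if_pos ha]
  · rw [if_neg ha, pvLoopA_char _ 0 (by norm_num), if_neg]
    rintro ⟨-, h | h⟩
    · simp only [List.length_cons] at h; omega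
    · exact List.cons_ne_nil _ _ h

lemma pvMainL (l : List Char) (hpre : pvRaisesB l = false) :
    validateOpeningHoursL l = validateOpeningHoursAltL l := by
  rcases l with _ | ⟨a, _ | ⟨b, _ | ⟨c, _ | ⟨d, rest⟩⟩⟩⟩
  · rfl
  · by_cases hall : ([a].all (· ∈ pvWL)) = true
    · have ha : a ∈ pvWL := by simpa using hall
      fin_cases ha <;> revert hpre <;> decide
    · rw [pvA_false_of_not_all _ (by simpa using hall),
        pvB_false_of_not_all _ (by simpa using hall)]
  · by_cases hall : ([a, b].all (· ∈ pvWL)) = true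
    · obtain ⟨ha, hb⟩ : a ∈ pvWL ∧ b ∈ pvWL := by simpa using hall
      fin_cases ha <;> fin_cases hb <;> revert hpre <;> decide
    · rw [pvA_false_of_not_all _ (by simpa using hall),
        pvB_false_of_not_all _ (by simpa using hall)]
  · by_cases hall : ([a, b, c].all (· ∈ pvWL)) = true
    · obtain ⟨ha, hb, hc⟩ : a ∈ pvWL ∧ b ∈ pvWL ∧ c ∈ pvWL := by simpa using hall
      fin_cases ha <;> fin_cases hb <;> fin_cases hc <;> revert hpre <;> decide
    · rw [pvA_false_of_not_all _ (by simpa using hall),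
        pvB_false_of_not_all _ (by simpa using hall)]
  · rw [pvA_false_of_long, pvB_false_of_len _ (by simp)]

-- ===== VERDICT (by name: the statement is the Claim_ definition above) =====
theorem validateOpeningHours_spec : Claim_equal_validateOpeningHours := by
  intro s _ hpre
  unfold Spec_validateOpeningHours validateOpeningHours validateOpeningHours_alt
  exact pvMainL s.toList hpre
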